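-- pv_equiv track=rewrite | github.com/pypi-data/pypi-mirror-98 | packages/dancingcell/dancingcell-0.0.3b3.tar.gz/dancingcell-0.0.3b2/dancingcell/vasp/bppb.py | _get_all_number
-- ===== SOURCE A (Python) =====
-- def _get_all_number(kpoint,bands,ions):
--     '''返回每个k点对应的所有能到的行号'''
--     kpoint_number = __get_kpoint_line_number(kpoint,bands,ions)
--     kpoint = kpoint_number.keys()
--     all_line = {}
--     for b in kpoint:
--         nn = __get_bands_line_number(kpoint_number[b],bands,ions)
--         all_line[b] = nn
--     return all_line
--
-- def __get_kpoint_line_number(kpoint,bands,ions):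
--     '''
--     根据PROCAR格式自己制定规则，返回所有kpoint所在行的行号
--     '''
--     space = (ions + 4) * bands + bands + 3
--     kpoint_number = {}
--     for i in range(kpoint):
--         line = 4 + space * i
--         kpoint_number[i+1] = line
--     return kpoint_number
--
-- def __get_bands_line_number(kpoint_number,bands,ions):
--     '''
--     根据PROCAR格式自己制定规则，返回所有band所在行的行号
--     '''
--     space = ions+5
--     bands_number = {}
--     for i in range(bands):
--         line = kpoint_number +2 + space * i
--         bands_number[i+1] = line
--     return bands_number
-- ===== SOURCE B (Python) =====
-- def _get_all_number(kpoint, bands, ions):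
--     '''返回每个k点对应的所有能到的行号'''
--     if kpoint <= 0:
--         return {}
--     # band lines of the first k-point block, computed once
--     block = {b: 6 + (ions + 5) * (b - 1) for b in range(1, bands + 1)}
--     space = (ions + 4) * bands + bands + 3
--     all_line = {1: block}
--     for k in range(2, kpoint + 1):
--         # each further block is the previous one shifted by the block size
--         block = {b: v + space for b, v in block.items()}
--         all_line[k] = block
--     return all_line
-- ===== Notes on version B (the rewrite author's own statement) =====
-- stated objective: alternative
-- what changed: Instead of A's two staged helpers computing every line by a base+multiple closed form, B computes the first k-point's band-line dict once and derives each subsequent k-point's dict by shifting all values of the previous block by the block size, a single incremental pass.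
import Mathlib
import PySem

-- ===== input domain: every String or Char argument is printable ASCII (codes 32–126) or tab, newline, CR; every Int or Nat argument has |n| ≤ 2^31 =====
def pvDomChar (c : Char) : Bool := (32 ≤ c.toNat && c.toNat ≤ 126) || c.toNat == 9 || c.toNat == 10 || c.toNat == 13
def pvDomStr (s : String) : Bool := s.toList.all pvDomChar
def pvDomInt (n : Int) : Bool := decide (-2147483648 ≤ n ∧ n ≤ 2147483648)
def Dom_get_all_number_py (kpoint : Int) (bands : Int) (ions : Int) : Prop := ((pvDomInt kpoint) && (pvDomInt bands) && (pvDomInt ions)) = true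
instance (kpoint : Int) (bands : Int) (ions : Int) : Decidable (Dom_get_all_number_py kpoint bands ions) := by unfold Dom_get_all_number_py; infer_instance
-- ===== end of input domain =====

-- B computes the first k-point's band-line dict once and derives every later one by shifting
-- the previous block's values by the block size (incremental pass); objective: alternative, same cost.

-- ===== PORT A =====
-- __get_kpoint_line_number
def get_kpoint_line_number (kpoint : Int) (bands : Int) (ions : Int) : PySem.Dict Int Int :=
  let space := (ions + 4) * bands + bands + 3
  (PySem.List.pyRange 0 kpoint 1).foldl
    (fun d i => d.insert (i + 1) (4 + space * i)) PySem.Dict.empty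

-- __get_bands_line_number
def get_bands_line_number (kpoint_number : Int) (bands : Int) (ions : Int) : PySem.Dict Int Int :=
  let space := ions + 5
  (PySem.List.pyRange 0 bands 1).foldl
    (fun d i => d.insert (i + 1) (kpoint_number + 2 + space * i)) PySem.Dict.empty

def get_all_number_py (kpoint : Int) (bands : Int) (ions : Int) : List (Int × List (Int × Int)) :=
  let kpoint_number := get_kpoint_line_number kpoint bands ions
  let ks := kpoint_number.keys
  -- kpoint_number[b]: b always a key of the dict, so getD is exact (no KeyError possible)
  (ks.foldl (fun all_line b =>
      all_line.insert b (get_bands_line_number (kpoint_number.getD b 0) bands ions).items)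
    PySem.Dict.empty).items

-- ===== PORT B =====
def get_all_number_py_alt (kpoint : Int) (bands : Int) (ions : Int) : List (Int × List (Int × Int)) :=
  if kpoint ≤ 0 then []
  else
    -- dict comprehensions over distinct keys: the dicts ARE these pair lists
    let block0 := (PySem.List.pyRange 1 (bands + 1) 1).map (fun b => (b, 6 + (ions + 5) * (b - 1)))
    let space := (ions + 4) * bands + bands + 3
    let st := (PySem.List.pyRange 2 (kpoint + 1) 1).foldl
      (fun (st : List (Int × Int) × List (Int × List (Int × Int))) k =>
        let block := st.1.map (fun p => (p.1, p.2 + space))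
        (block, st.2 ++ [(k, block)]))
      (block0, [((1 : Int), block0)])
    st.2

-- ===== PRECONDITION & SPEC =====
def Spec_get_all_number_py (kpoint : Int) (bands : Int) (ions : Int) (out : List (Int × List (Int × Int))) : Prop := out = get_all_number_py_alt kpoint bands ions
instance (kpoint : Int) (bands : Int) (ions : Int) (out : List (Int × List (Int × Int))) : Decidable (Spec_get_all_number_py kpoint bands ions out) := by unfold Spec_get_all_number_py; infer_instance

-- ===== CLAIM =====
def Claim_equal_get_all_number_py : Prop := ∀ (kpoint : Int) (bands : Int) (ions : Int), Dom_get_all_number_py kpoint bands ions → Spec_get_all_number_py kpoint bands ions (get_all_number_py kpoint bands ions)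

-- ===== LEMMAS AND PROOFS =====

-- a fold inserting fresh distinct keys i+1 over a range yields exactly the mapped pair list
theorem items_fold_range (n : Int) (f : Int → Int) :
    ((PySem.List.pyRange 0 n 1).foldl
      (fun (d : PySem.Dict Int Int) i => d.insert (i + 1) (f i)) PySem.Dict.empty).items
    = (PySem.List.pyRange 0 n 1).map (fun i => (i + 1, f i)) := by
  have h := PySem.Dict.items_foldl_insert_fresh (l := PySem.List.pyRange 0 n 1)
    (k := fun i => i + 1) (v := f) (d := PySem.Dict.empty)
    (by intro a _; simp)
    (by
      have : (PySem.List.pyRange 0 n 1).Nodup := PySem.List.nodup_pyRange_one 0 n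
      exact this.map (fun a b h => by omega))
  simpa using h

theorem get_kpoint_items (kpoint bands ions : Int) :
    (get_kpoint_line_number kpoint bands ions).items
    = (PySem.List.pyRange 0 kpoint 1).map
        (fun i => (i + 1, 4 + ((ions + 4) * bands + bands + 3) * i)) := by
  unfold get_kpoint_line_number
  exact items_fold_range kpoint _

theorem get_bands_items (kn bands ions : Int) :
    (get_bands_line_number kn bands ions).items
    = (PySem.List.pyRange 0 bands 1).map (fun i => (i + 1, kn + 2 + (ions + 5) * i)) := by
  unfold get_bands_line_number
  exact items_fold_range bands _

theorem kp_keys_nodup (kpoint bands ions : Int) :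
    (get_kpoint_line_number kpoint bands ions).keys.Nodup := by
  have : (get_kpoint_line_number kpoint bands ions).keys
      = (PySem.List.pyRange 0 kpoint 1).map (fun i => i + 1) := by
    simp only [PySem.Dict.keys, get_kpoint_items, List.map_map]
    rfl
  rw [this]
  exact (PySem.List.nodup_pyRange_one 0 kpoint).map (fun a b h => by omega)

-- A in closed form
theorem a_closed (kpoint bands ions : Int) :
    get_all_number_py kpoint bands ions
    = (PySem.List.pyRange 0 kpoint 1).map (fun k =>
        (k + 1, (PySem.List.pyRange 0 bands 1).map (fun b =>
          (b + 1, 4 + ((ions + 4) * bands + bands + 3) * k + 2 + (ions + 5) * b)))) := by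
  unfold get_all_number_py
  set kn := get_kpoint_line_number kpoint bands ions with hkn
  have hkeys : kn.keys = (PySem.List.pyRange 0 kpoint 1).map (fun i => i + 1) := by
    simp only [PySem.Dict.keys, hkn, get_kpoint_items, List.map_map]; rfl
  have houter := PySem.Dict.items_foldl_insert_fresh (l := kn.keys)
    (k := fun b => b) (v := fun b => (get_bands_line_number (kn.getD b 0) bands ions).items)
    (d := PySem.Dict.empty)
    (by intro a _; simp)
    (by simpa using kp_keys_nodup kpoint bands ions)
  rw [houter]
  rw [hkeys, List.map_map]
  apply List.map_congr_left
  intro i hi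
  have hmem : (i + 1, 4 + ((ions + 4) * bands + bands + 3) * i) ∈ kn.items := by
    rw [hkn, get_kpoint_items]
    exact List.mem_map.mpr ⟨i, hi, rfl⟩
  have hget : kn.getD (i + 1) 0 = 4 + ((ions + 4) * bands + bands + 3) * i :=
    PySem.Dict.getD_of_mem_items (d := kn) hmem (kp_keys_nodup kpoint bands ions) 0
  simp only [Function.comp_apply, hget, get_bands_items]

-- the m-th block in closed form (keys 1..bands, values shifted m times)
def pvBlock (bands ions space : Int) (m : Nat) : List (Int × Int) :=
  (List.range bands.toNat).map (fun b : Nat => ((b : Int) + 1, 6 + (ions + 5) * (b : Int) + space * (m : Int)))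

theorem pvBlock_shift (bands ions space : Int) (m : Nat) :
    (pvBlock bands ions space m).map (fun p => (p.1, p.2 + space)) = pvBlock bands ions space (m + 1) := by
  simp only [pvBlock, List.map_map]
  apply List.map_congr_left
  intro b _
  simp only [Function.comp_apply, Prod.mk.injEq]
  exact ⟨trivial, by push_cast; ring⟩

theorem pvBlock_zero (bands ions space : Int) :
    (PySem.List.pyRange 1 (bands + 1) 1).map (fun b => (b, 6 + (ions + 5) * (b - 1)))
    = pvBlock bands ions space 0 := by
  rw [PySem.List.pyRange_one]
  simp only [pvBlock, List.map_map]
  have h : (bands + 1 - 1).toNat = bands.toNat := by omega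
  rw [h]
  apply List.map_congr_left
  intro b _
  simp only [Function.comp_apply, Prod.mk.injEq]
  exact ⟨by ring, by push_cast; ring⟩

-- the fold invariant: after processing range(2, 2+n) the output lists blocks 0..n
theorem fold_invariant (bands ions space : Int) (n : Nat) :
    (PySem.List.pyRange 2 (2 + n) 1).foldl
      (fun (st : List (Int × Int) × List (Int × List (Int × Int))) k =>
        let block := st.1.map (fun p => (p.1, p.2 + space))
        (block, st.2 ++ [(k, block)]))
      (pvBlock bands ions space 0, [((1 : Int), pvBlock bands ions space 0)])
    = (pvBlock bands ions space n,
       (List.range (n + 1)).map (fun m : Nat => ((m : Int) + 1, pvBlock bands ions space m))) := by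
  induction n with
  | zero =>
    rw [PySem.List.pyRange_one_eq_nil (by omega)]
    simp [List.range_succ]
  | succ n ih =>
    have hsplit : PySem.List.pyRange 2 (2 + (n + 1 : Nat)) 1
        = PySem.List.pyRange 2 (2 + n) 1 ++ [(2 + n : Int)] := by
      have := PySem.List.pyRange_one_succ_right (a := 2) (b := 2 + (n : Int)) (by omega)
      push_cast
      push_cast at this
      rw [show (2 : Int) + ((n : Int) + 1) = 2 + (n : Int) + 1 by ring]
      exact this
    rw [hsplit, List.foldl_append, ih]
    simp only [List.foldl_cons, List.foldl_nil, pvBlock_shift, Prod.mk.injEq]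
    refine ⟨trivial, ?_⟩
    rw [List.range_succ (n := n + 1)]
    simp only [List.map_append, List.map_cons, List.map_nil]
    have : ((2 : Int) + (n : Int), pvBlock bands ions space (n + 1))
        = (((n + 1 : Nat) : Int) + 1, pvBlock bands ions space (n + 1)) := by
      simp only [Prod.mk.injEq]
      exact ⟨by push_cast; ring, trivial⟩
    rw [this]

theorem get_all_number_py_eq (kpoint bands ions : Int) :
    get_all_number_py kpoint bands ions = get_all_number_py_alt kpoint bands ions := by
  rw [a_closed]
  unfold get_all_number_py_alt
  by_cases hk : kpoint ≤ 0
  · rw [if_pos hk, PySem.List.pyRange_one_eq_nil (a := 0) (b := kpoint) (by omega)]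
    rfl
  · rw [if_neg hk]
    rw [not_le] at hk
    set space := (ions + 4) * bands + bands + 3 with hspace
    have hn : ∃ n : Nat, kpoint = (n : Int) + 1 := ⟨(kpoint - 1).toNat, by omega⟩
    obtain ⟨n, rfl⟩ := hn
    simp only [pvBlock_zero bands ions space]
    have h2 : (n : Int) + 1 + 1 = 2 + (n : Int) := by ring
    rw [h2]
    have := fold_invariant bands ions space n
    push_cast at this ⊢
    rw [this]
    -- both sides are maps over ranges of length n+1
    rw [PySem.List.pyRange_one, PySem.List.pyRange_one]
    have hlen : ((n : Int) + 1 - 0).toNat = n + 1 := by omega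
    have hb : (bands - 0).toNat = bands.toNat := by omega
    rw [hlen, hb, List.map_map]
    apply List.map_congr_left
    intro k _
    simp only [Function.comp_apply, Prod.mk.injEq]
    refine ⟨by ring, ?_⟩
    simp only [pvBlock, List.map_map]
    apply List.map_congr_left
    intro b _
    simp only [Function.comp_apply, Prod.mk.injEq]
    exact ⟨by ring, by ring⟩

-- ===== VERDICT =====
theorem get_all_number_py_spec : Claim_equal_get_all_number_py := by
  intro kpoint bands ions _
  exact get_all_number_py_eq kpoint bands ions
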